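-- pv_equiv track=rewrite | github.com/intulda/pacemeter-core | scripts/anonymize_act_log.py | anonymize_lines
-- ===== SOURCE A (Python) =====
-- def anonymize_lines(lines: list[str]) -> tuple[list[str], dict[str, str]]:
--     alias_map: dict[str, str] = {}
--     next_id = 1
--     output: list[str] = []
--
--     for line in lines:
--         if "|" not in line:
--             output.append(line)
--             continue
--
--         parts = line.rstrip("\n").split("|")
--         line_type = parts[0]
--         replaced = []
--         for index, part in enumerate(parts):
--             if should_anonymize_field(line_type, index, part):
--                 alias = alias_map.get(part)
--                 if alias is None:
--                     alias = f"Player{next_id:02d}"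
--                     alias_map[part] = alias
--                     next_id += 1
--                 replaced.append(alias)
--             else:
--                 replaced.append(part)
--         output.append("|".join(replaced))
--
--     return output, alias_map
--
-- def is_probable_name(value: str) -> bool:
--     if not value or len(value) < 2 or len(value) > 24:
--         return False
--     if value.isdigit():
--         return False
--     if all(ch in "0123456789ABCDEFabcdef" for ch in value):
--         return False
--     if any(ch in value for ch in ("=", "{", "}", "[", "]", "/", "\\")):
--         return False
--     if value.lower() in {"logline", "combatdata", "changeparty", "changezone", "dot", "hot"}:
--         return False
--     return True
--
-- def should_anonymize_field(line_type: str, index: int, value: str) -> bool: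
--     if not is_probable_name(value):
--         return False
--
--     name_fields_by_type = {
--         "00": {4},
--         "01": {3},
--         "02": {3},
--         "03": {3, 7},
--         "04": {3, 7},
--         "11": set(),
--         "21": {3, 5, 7},
--         "22": {3, 5, 7},
--         "24": {3, 4, 18},
--         "25": {3},
--         "26": {3, 6, 8},
--         "27": {3, 6, 8},
--         "28": {3, 6, 8},
--         "29": {3, 6, 8},
--         "30": {3, 6, 8},
--         "31": {3, 6, 8},
--         "37": {3},
--         "38": {3},
--         "39": {3},
--         "261": set(),
--         "264": set(),
--         "270": {3},
--     }
--
--     name_fields = name_fields_by_type.get(line_type)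
--     if name_fields is None:
--         return False
--     return index in name_fields
-- ===== SOURCE B (Python) =====
-- # Two-pass re-implementation: pass 1 builds the complete alias map in
-- # first-encounter order; pass 2 rewrites every line through the finished map.
--
-- def is_probable_name(value: str) -> bool:
--     if not value or len(value) < 2 or len(value) > 24:
--         return False
--     if value.isdigit():
--         return False
--     if all(ch in "0123456789ABCDEFabcdef" for ch in value):
--         return False
--     if any(ch in value for ch in ("=", "{", "}", "[", "]", "/", "\\")):
--         return False
--     if value.lower() in {"logline", "combatdata", "changeparty", "changezone", "dot", "hot"}:
--         return False
--     return True
--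
-- _NAME_FIELDS_BY_TYPE = {
--     "00": {4}, "01": {3}, "02": {3}, "03": {3, 7}, "04": {3, 7}, "11": set(),
--     "21": {3, 5, 7}, "22": {3, 5, 7}, "24": {3, 4, 18}, "25": {3},
--     "26": {3, 6, 8}, "27": {3, 6, 8}, "28": {3, 6, 8}, "29": {3, 6, 8},
--     "30": {3, 6, 8}, "31": {3, 6, 8}, "37": {3}, "38": {3}, "39": {3},
--     "261": set(), "264": set(), "270": {3},
-- }
--
-- def should_anonymize_field(line_type: str, index: int, value: str) -> bool:
--     if not is_probable_name(value):
--         return False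
--     name_fields = _NAME_FIELDS_BY_TYPE.get(line_type)
--     if name_fields is None:
--         return False
--     return index in name_fields
--
-- def anonymize_lines(lines: list[str]) -> tuple[list[str], dict[str, str]]:
--     # Pass 1: collect aliases in first-encounter order.
--     alias_map: dict[str, str] = {}
--     next_id = 1
--     for line in lines:
--         if "|" in line:
--             parts = line.rstrip("\n").split("|")
--             line_type = parts[0]
--             for index, part in enumerate(parts):
--                 if should_anonymize_field(line_type, index, part) and part not in alias_map:
--                     alias_map[part] = f"Player{next_id:02d}"
--                     next_id += 1
--     # Pass 2: rewrite through the finished map.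
--     output = []
--     for line in lines:
--         if "|" in line:
--             parts = line.rstrip("\n").split("|")
--             line_type = parts[0]
--             output.append("|".join(
--                 alias_map.get(part, part) if should_anonymize_field(line_type, index, part) else part
--                 for index, part in enumerate(parts)))
--         else:
--             output.append(line)
--     return output, alias_map
-- ===== Notes on version B (the rewrite author's own statement) =====
-- stated objective: alternative
-- what changed: B replaces A's single interleaved pass (rewriting each line with the partially-built alias map) by two passes: pass 1 only builds the complete alias map in first-encounter order, pass 2 rewrites every line through the finished map.
import Mathlib
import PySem

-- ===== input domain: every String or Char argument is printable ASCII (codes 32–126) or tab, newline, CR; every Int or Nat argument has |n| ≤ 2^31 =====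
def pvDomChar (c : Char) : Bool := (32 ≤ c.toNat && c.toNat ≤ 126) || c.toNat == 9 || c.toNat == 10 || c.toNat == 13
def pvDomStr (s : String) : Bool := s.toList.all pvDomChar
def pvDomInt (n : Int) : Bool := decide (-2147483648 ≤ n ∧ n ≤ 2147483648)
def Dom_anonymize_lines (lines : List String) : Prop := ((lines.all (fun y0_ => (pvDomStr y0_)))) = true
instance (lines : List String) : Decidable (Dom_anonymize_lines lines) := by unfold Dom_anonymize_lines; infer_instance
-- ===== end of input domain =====

-- B is a two-pass decomposition of A (pass 1 builds the whole alias map, pass 2 rewrites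
-- through the finished map); same cost, different structure. Return value only is compared.

-- ===== PORT A =====
-- shared helpers (identical code in Source A and Source B)

-- line.rstrip("\n") ported by hand (PySem strip takes no char set on one side): exact —
-- drops exactly the trailing '\n' characters
-- split on the non-empty literal "|": split? is never none here
def pySplit (s sep : String) : List String := (PySem.Str.split? s sep).getD []

def rstripNl (s : String) : String :=
  String.ofList ((s.toList.reverse.dropWhile (fun c => c == '\n')).reverse)

-- f"Player{next_id:02d}": for any int, format '02d' equals str(n) left-padded with '0' to width 2
def fmt02 (n : Int) : String := PySem.Str.zfill (PySem.Int.toStr n) 2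

def is_probable_name (v : String) : Bool :=
  if PySem.Str.len v == 0 || PySem.Str.len v < 2 || PySem.Str.len v > 24 then false
  else if PySem.Str.strIsdigit v then false
  else if v.toList.all (fun ch => PySem.Str.isIn (String.ofList [ch]) "0123456789ABCDEFabcdef") then false
  else if ["=", "{", "}", "[", "]", "/", "\\"].any (fun c => PySem.Str.isIn c v) then false
  else if ["logline", "combatdata", "changeparty", "changezone", "dot", "hot"].contains (PySem.Str.lower v) then false
  else true

def nameFieldsByType : PySem.Dict String (List Int) := PySem.Dict.ofList
  [("00", [4]), ("01", [3]), ("02", [3]), ("03", [3, 7]), ("04", [3, 7]), ("11", []),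
   ("21", [3, 5, 7]), ("22", [3, 5, 7]), ("24", [3, 4, 18]), ("25", [3]),
   ("26", [3, 6, 8]), ("27", [3, 6, 8]), ("28", [3, 6, 8]), ("29", [3, 6, 8]),
   ("30", [3, 6, 8]), ("31", [3, 6, 8]), ("37", [3]), ("38", [3]), ("39", [3]),
   ("261", []), ("264", []), ("270", [3])]

def should_anonymize_field (lineType : String) (index : Int) (value : String) : Bool :=
  if !is_probable_name value then false
  else
    match nameFieldsByType.get? lineType with
    | none => false
    | some fs => fs.contains index

-- A's inner loop body (one field of a '|' line)
def innerA (lineType : String) (st : PySem.Dict String String × Int × List String)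
    (ip : Int × String) : PySem.Dict String String × Int × List String :=
  if should_anonymize_field lineType ip.1 ip.2 then
    match st.1.get? ip.2 with
    | none =>
        (st.1.insert ip.2 ("Player" ++ fmt02 st.2.1), st.2.1 + 1, st.2.2 ++ ["Player" ++ fmt02 st.2.1])
    | some a => (st.1, st.2.1, st.2.2 ++ [a])
  else (st.1, st.2.1, st.2.2 ++ [ip.2])

-- A's outer loop body (one line)
def stepA (st : PySem.Dict String String × Int × List String) (line : String) :
    PySem.Dict String String × Int × List String :=
  if !PySem.Str.isIn "|" line then (st.1, st.2.1, st.2.2 ++ [line])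
  else
    let parts := pySplit (rstripNl line) "|"
    let r := (PySem.List.enumerate parts 0).foldl (innerA (parts.headD "")) (st.1, st.2.1, [])
    (r.1, r.2.1, st.2.2 ++ [PySem.Str.join "|" r.2.2])

def anonymize_lines (lines : List String) : List String × (List (String × String)) :=
  let r := lines.foldl stepA (PySem.Dict.empty, 1, [])
  (r.2.2, r.1.items)

-- ===== PORT B =====
-- pass 1, one field: record a fresh alias if the field is a name not seen before
def passOneField (lineType : String) (st : PySem.Dict String String × Int)
    (ip : Int × String) : PySem.Dict String String × Int :=
  if should_anonymize_field lineType ip.1 ip.2 && !st.1.contains ip.2 then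
    (st.1.insert ip.2 ("Player" ++ fmt02 st.2), st.2 + 1)
  else st

-- pass 1, one line
def passOne (st : PySem.Dict String String × Int) (line : String) :
    PySem.Dict String String × Int :=
  if PySem.Str.isIn "|" line then
    let parts := pySplit (rstripNl line) "|"
    (PySem.List.enumerate parts 0).foldl (passOneField (parts.headD "")) st
  else st

-- pass 2, one line, through the finished alias map
def renderLine (am : PySem.Dict String String) (line : String) : String :=
  if PySem.Str.isIn "|" line then
    let parts := pySplit (rstripNl line) "|"
    PySem.Str.join "|" ((PySem.List.enumerate parts 0).map (fun ip =>
      if should_anonymize_field (parts.headD "") ip.1 ip.2 then am.getD ip.2 ip.2 else ip.2))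
  else line

def anonymize_lines_alt (lines : List String) : List String × (List (String × String)) :=
  let am := (lines.foldl passOne (PySem.Dict.empty, 1)).1
  (lines.map (renderLine am), am.items)

-- ===== PRECONDITION & SPEC =====
def Spec_anonymize_lines (lines : List String) (out : List String × (List (String × String))) : Prop := out = anonymize_lines_alt lines
instance (lines : List String) (out : List String × (List (String × String))) : Decidable (Spec_anonymize_lines lines out) := by unfold Spec_anonymize_lines; infer_instance

-- ===== CLAIM (what is proved, stated in full; the proofs are below) =====
def Claim_equal_anonymize_lines : Prop := ∀ (lines : List String), Dom_anonymize_lines lines → Spec_anonymize_lines lines (anonymize_lines lines)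

-- ===== LEMMAS AND PROOFS =====

-- d₁'s bindings all survive in d₂
def Submap (d₁ d₂ : PySem.Dict String String) : Prop :=
  ∀ k v, d₁.get? k = some v → d₂.get? k = some v

theorem submap_refl (d : PySem.Dict String String) : Submap d d := fun _ _ h => h

theorem submap_passOneField (lt : String) (st : PySem.Dict String String × Int)
    (ip : Int × String) : Submap st.1 (passOneField lt st ip).1 := by
  unfold passOneField
  split
  · rename_i hc
    intro k v hk
    have hcon : st.1.contains ip.2 = false := by
      cases hcc : st.1.contains ip.2
      · rfl
      · simp [hcc] at hc
    have hne : k ≠ ip.2 := by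
      intro he
      rw [PySem.Dict.contains_eq_isSome_get?] at hcon
      rw [he] at hk
      rw [hk] at hcon
      simp at hcon
    rw [PySem.Dict.get?_insert]
    simp [hne, hk]
  · exact fun _ _ h => h

theorem submap_innerB (eps : List (Int × String)) (lt : String) :
    ∀ st : PySem.Dict String String × Int,
      Submap st.1 ((eps.foldl (passOneField lt) st).1) := by
  induction eps with
  | nil => intro st; exact submap_refl _
  | cons ip rest ih =>
      intro st k v hk
      exact ih (passOneField lt st ip) k v (submap_passOneField lt st ip k v hk)

theorem submap_passOne (lines : List String) :
    ∀ st : PySem.Dict String String × Int,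
      Submap st.1 ((lines.foldl passOne st).1) := by
  induction lines with
  | nil => intro st; exact submap_refl _
  | cons l rest ih =>
      intro st k v hk
      refine ih (passOne st l) k v ?_
      unfold passOne
      split
      · exact submap_innerB _ _ st k v hk
      · exact hk

-- A's inner loop equals B's pass-1 state plus the rendered fields (through any map M
-- extending the state B's pass 1 reaches after these fields)
theorem inner_eq (eps : List (Int × String)) (lt : String) :
    ∀ (am : PySem.Dict String String) (nid : Int) (repl : List String)
      (M : PySem.Dict String String),
      Submap ((eps.foldl (passOneField lt) (am, nid)).1) M →
      eps.foldl (innerA lt) (am, nid, repl) =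
        ((eps.foldl (passOneField lt) (am, nid)).1,
         (eps.foldl (passOneField lt) (am, nid)).2,
         repl ++ eps.map (fun ip =>
           if should_anonymize_field lt ip.1 ip.2 then M.getD ip.2 ip.2 else ip.2)) := by
  induction eps with
  | nil => intro am nid repl M _; simp
  | cons ip rest ih =>
      intro am nid repl M hM
      rw [List.foldl_cons] at hM
      rw [List.foldl_cons, List.foldl_cons, List.map_cons]
      cases hS : should_anonymize_field lt ip.1 ip.2 with
      | true =>
        cases hG : PySem.Dict.get? am ip.2 with
        | some a =>
            have hcon : am.contains ip.2 = true := by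
              rw [PySem.Dict.contains_eq_isSome_get?, hG]; rfl
            have hstep : passOneField lt (am, nid) ip = (am, nid) := by
              unfold passOneField; rw [hS, hcon]; simp
            rw [hstep] at hM ⊢
            have hMa : M.get? ip.2 = some a :=
              hM ip.2 a (submap_innerB rest lt (am, nid) ip.2 a hG)
            have hA : innerA lt (am, nid, repl) ip = (am, nid, repl ++ [a]) := by
              unfold innerA; rw [hS]; simp [hG]
            rw [hA, ih am nid (repl ++ [a]) M hM,
              PySem.Dict.getD_eq_get?_getD, hMa]
            simp
        | none =>
            have hcon : am.contains ip.2 = false := by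
              rw [PySem.Dict.contains_eq_isSome_get?, hG]; rfl
            have hstep : passOneField lt (am, nid) ip =
                (am.insert ip.2 ("Player" ++ fmt02 nid), nid + 1) := by
              unfold passOneField; rw [hS, hcon]; simp
            rw [hstep] at hM ⊢
            have hMa : M.get? ip.2 = some ("Player" ++ fmt02 nid) :=
              hM ip.2 _ (submap_innerB rest lt _ ip.2 _
                (PySem.Dict.get?_insert_self am ip.2 _))
            have hA : innerA lt (am, nid, repl) ip =
                (am.insert ip.2 ("Player" ++ fmt02 nid), nid + 1,
                 repl ++ ["Player" ++ fmt02 nid]) := by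
              unfold innerA; rw [hS]; simp [hG]
            rw [hA, ih _ _ _ M hM, PySem.Dict.getD_eq_get?_getD, hMa]
            simp
      | false =>
        have hstep : passOneField lt (am, nid) ip = (am, nid) := by
          unfold passOneField; rw [hS]; simp
        rw [hstep] at hM ⊢
        have hA : innerA lt (am, nid, repl) ip = (am, nid, repl ++ [ip.2]) := by
          unfold innerA; rw [hS]; simp
        rw [hA, ih am nid (repl ++ [ip.2]) M hM]
        simp

-- A's outer loop equals B's pass-1 state plus the lines rendered through any map M
-- extending the state B's pass 1 reaches
theorem outer_eq (lines : List String) :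
    ∀ (am : PySem.Dict String String) (nid : Int) (out : List String)
      (M : PySem.Dict String String),
      Submap ((lines.foldl passOne (am, nid)).1) M →
      lines.foldl stepA (am, nid, out) =
        ((lines.foldl passOne (am, nid)).1, (lines.foldl passOne (am, nid)).2,
         out ++ lines.map (renderLine M)) := by
  induction lines with
  | nil => intro am nid out M _; simp
  | cons l rest ih =>
      intro am nid out M hM
      rw [List.foldl_cons] at hM
      rw [List.foldl_cons, List.foldl_cons, List.map_cons]
      cases hP : PySem.Str.isIn "|" l with
      | true =>
        have hstep : passOne (am, nid) l =
            (PySem.List.enumerate (pySplit (rstripNl l) "|") 0).foldl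
              (passOneField ((pySplit (rstripNl l) "|").headD "")) (am, nid) := by
          unfold passOne
          rw [hP, if_pos (rfl : (true : Bool) = true)]
        have hSub1 : Submap ((passOne (am, nid) l).1) M := fun k v hk =>
          hM k v (submap_passOne rest (passOne (am, nid) l) k v hk)
        have hInner := inner_eq
          (PySem.List.enumerate (pySplit (rstripNl l) "|") 0)
          ((pySplit (rstripNl l) "|").headD "") am nid [] M
          (by rw [← hstep]; exact hSub1)
        have hA : stepA (am, nid, out) l =
            ((passOne (am, nid) l).1, (passOne (am, nid) l).2,
             out ++ [renderLine M l]) := by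
          unfold stepA renderLine
          rw [hP, Bool.not_true]
          rw [if_neg (show ¬((false : Bool) = true) by decide)]
          rw [if_pos (rfl : (true : Bool) = true)]
          simp only []
          rw [hInner, hstep]
          simp only [List.nil_append]
        rw [hA, ih (passOne (am, nid) l).1 (passOne (am, nid) l).2 (out ++ [renderLine M l]) M hM]
        simp only [List.append_assoc, List.singleton_append]
      | false =>
        have hstep : passOne (am, nid) l = (am, nid) := by
          unfold passOne
          rw [hP, if_neg (show ¬((false : Bool) = true) by decide)]
        rw [hstep] at hM ⊢
        have hA : stepA (am, nid, out) l = (am, nid, out ++ [l]) := by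
          unfold stepA
          rw [hP, Bool.not_false, if_pos (rfl : (true : Bool) = true)]
        have hR : renderLine M l = l := by
          unfold renderLine
          rw [hP, if_neg (show ¬((false : Bool) = true) by decide)]
        rw [hA, hR, ih am nid (out ++ [l]) M hM]
        simp only [List.append_assoc, List.singleton_append]

-- ===== VERDICT (by name: the statement is the Claim_ definition above) =====
theorem anonymize_lines_spec : Claim_equal_anonymize_lines := by
  intro lines _
  unfold Spec_anonymize_lines anonymize_lines anonymize_lines_alt
  rw [outer_eq lines PySem.Dict.empty 1 [] ((lines.foldl passOne (PySem.Dict.empty, 1)).1)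
    (submap_refl _)]
  simp only [List.nil_append]
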